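-- pv_equiv track=rewrite | github.com/minstack/VendGUITool | VendFixAvgCost.py | filterProdIdInventories
-- ===== SOURCE A (Python) =====
-- def filterProdIdInventories(ids, pidtoinv):
--     idtoinv = {}
--
--     for id in ids:
--         pinv = pidtoinv[id]
--         curridinv = idtoinv.get(id, None)
--
--         #vals must be lists for multioutlet
--         if curridinv is not None:
--             curridinv.append(pinv)
--             continue
--
--         idtoinv[id] = [pinv]
--
--     return idtoinv
-- ===== SOURCE B (Python) =====
-- def filterProdIdInventories(ids, pidtoinv):
--     # count occurrences first, then build each list in one shot:
--     # every occurrence of an id contributes the same object pidtoinv[id]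
--     counts = {}
--     for id in ids:
--         counts[id] = counts.get(id, 0) + 1
--     return {id: [pidtoinv[id]] * cnt for id, cnt in counts.items()}
-- ===== Notes on version B (the rewrite author's own statement) =====
-- stated objective: alternative
-- what changed: Replaces the streaming get-or-append dict loop with a two-phase count-then-replicate construction: first a frequency table of ids, then each value list is built at once as [pidtoinv[id]] * count, relying on the proved fact that every occurrence of an id appends the same value.
import Mathlib
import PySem

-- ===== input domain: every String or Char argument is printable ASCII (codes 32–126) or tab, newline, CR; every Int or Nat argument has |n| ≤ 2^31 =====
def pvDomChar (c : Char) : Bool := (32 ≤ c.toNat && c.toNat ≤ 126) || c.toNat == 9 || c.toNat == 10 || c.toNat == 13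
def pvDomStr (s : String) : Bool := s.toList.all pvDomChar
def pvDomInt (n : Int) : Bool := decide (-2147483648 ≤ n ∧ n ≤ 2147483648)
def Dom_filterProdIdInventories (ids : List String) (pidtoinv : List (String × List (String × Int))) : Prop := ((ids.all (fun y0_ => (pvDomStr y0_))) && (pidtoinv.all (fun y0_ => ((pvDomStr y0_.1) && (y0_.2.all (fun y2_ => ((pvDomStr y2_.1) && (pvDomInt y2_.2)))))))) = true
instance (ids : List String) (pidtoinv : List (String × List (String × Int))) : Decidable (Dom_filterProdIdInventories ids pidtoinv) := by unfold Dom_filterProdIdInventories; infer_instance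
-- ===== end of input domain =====

-- B builds the result in two phases (count ids first, then replicate each value) instead of
-- A's streaming get-or-append loop; equivalence of RETURN values is proved on Pre_ (all ids present).

-- ===== PORT A =====
-- the 'for id in ids' loop; on a missing id Python raises KeyError (excluded by Pre_), here the loop stops
def filterProdIdInventoriesLoop (pd : PySem.Dict String (List (String × Int))) :
    List String → PySem.Dict String (List (List (String × Int))) → PySem.Dict String (List (List (String × Int)))
  | [], d => d
  | id :: rest, d =>
    match pd.get? id with
    | none => d
    | some pinv =>
      match d.get? id with
      | some curridinv => filterProdIdInventoriesLoop pd rest (d.insert id (curridinv ++ [pinv]))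
      | none => filterProdIdInventoriesLoop pd rest (d.insert id [pinv])

def filterProdIdInventories (ids : List String) (pidtoinv : List (String × List (String × Int))) : List (String × List (List (String × Int))) :=
  (filterProdIdInventoriesLoop (PySem.Dict.ofList pidtoinv) ids PySem.Dict.empty).items

-- ===== PORT B =====
-- counts loop, then the dict comprehension; pidtoinv[id] (KeyError outside Pre_) is getD with unreachable default
def filterProdIdInventories_alt (ids : List String) (pidtoinv : List (String × List (String × Int))) : List (String × List (List (String × Int))) :=
  let pd := PySem.Dict.ofList pidtoinv
  let counts := ids.foldl (fun c id => c.insert id (c.getD id 0 + 1)) (PySem.Dict.empty : PySem.Dict String Int)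
  counts.items.map (fun kc => (kc.1, PySem.List.pyRepeat [pd.getD kc.1 []] kc.2))

-- ===== PRECONDITION & SPEC =====
-- Pre_ excludes exactly the inputs where some id is not a key of pidtoinv: there A raises KeyError.
def Pre_filterProdIdInventories (ids : List String) (pidtoinv : List (String × List (String × Int))) : Prop :=
  ∀ id ∈ ids, id ∈ pidtoinv.map Prod.fst
instance (ids : List String) (pidtoinv : List (String × List (String × Int))) : Decidable (Pre_filterProdIdInventories ids pidtoinv) := by unfold Pre_filterProdIdInventories; infer_instance
def pvWitness_filterProdIdInventories : List String × (List (String × List (String × Int))) :=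
  (["a", "b", "a"], [("a", [("x", 1)]), ("b", [])])

def Spec_filterProdIdInventories (ids : List String) (pidtoinv : List (String × List (String × Int))) (out : List (String × List (List (String × Int)))) : Prop := out = filterProdIdInventories_alt ids pidtoinv
instance (ids : List String) (pidtoinv : List (String × List (String × Int))) (out : List (String × List (List (String × Int)))) : Decidable (Spec_filterProdIdInventories ids pidtoinv out) := by unfold Spec_filterProdIdInventories; infer_instance

-- ===== CLAIM (what is proved, stated in full; the proofs are below) =====
def Claim_equal_filterProdIdInventories : Prop := ∀ (ids : List String) (pidtoinv : List (String × List (String × Int))), Dom_filterProdIdInventories ids pidtoinv → Pre_filterProdIdInventories ids pidtoinv → Spec_filterProdIdInventories ids pidtoinv (filterProdIdInventories ids pidtoinv)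

-- ===== LEMMAS AND PROOFS =====

-- the A-loop state after processing 'seen': keys are first occurrences, values replicated lookups
def gD (pd : PySem.Dict String (List (String × Int))) (seen : List String) : PySem.Dict String (List (List (String × Int))) :=
  PySem.Dict.mk ((PySem.Set.ofList seen).map (fun k => (k, List.replicate (seen.count k) (pd.getD k []))))

lemma gD_keys (pd : PySem.Dict String (List (String × Int))) (seen : List String) :
    (gD pd seen).keys = PySem.Set.ofList seen := by
  simp [gD, PySem.Dict.keys, Function.comp_def]


lemma gD_get? (pd : PySem.Dict String (List (String × Int))) (seen : List String) (k : String) :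
    (gD pd seen).get? k = if k ∈ seen then some (List.replicate (seen.count k) (pd.getD k [])) else none := by
  by_cases h : k ∈ seen
  · simp only [h, if_true]
    apply PySem.Dict.get?_of_mem_items
    · simp only [gD]
      exact List.mem_map.mpr ⟨k, (PySem.Set.mem_ofList _ _).mpr h, rfl⟩
    · rw [gD_keys]; exact PySem.Set.nodup_ofList seen
  · simp only [h, if_false]
    rw [PySem.Dict.get?_eq_none_iff_not_mem_keys, gD_keys]
    exact fun hm => h ((PySem.Set.mem_ofList _ _).mp hm)


lemma gD_snoc_mem (pd : PySem.Dict String (List (String × Int))) (seen : List String) (id : String)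
    (h : id ∈ seen) :
    gD pd (seen ++ [id]) = (gD pd seen).insert id (List.replicate (seen.count id) (pd.getD id []) ++ [pd.getD id []]) := by
  apply PySem.Dict.ext
  have hc : (gD pd seen).contains id = true := by
    rw [PySem.Dict.contains_eq_decide_mem_keys, gD_keys]
    simp [PySem.Set.mem_ofList, h]
  rw [PySem.Dict.items_insert_of_contains _ _ hc]
  simp only [gD, PySem.Set.ofList_append_singleton]
  have hadd : PySem.Set.add (PySem.Set.ofList seen) id = PySem.Set.ofList seen := by
    simp [PySem.Set.add, PySem.Set.contains, PySem.Set.mem_ofList, h]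
  rw [hadd, List.map_map]
  apply List.map_congr_left
  intro k hk
  have hk' : k ∈ seen := (PySem.Set.mem_ofList _ _).mp hk
  by_cases hkid : k = id
  · subst hkid
    simp [List.count_append, ← List.replicate_succ']
  · have : (k == id) = false := by simp [hkid]
    simp [Function.comp, this, List.count_append, List.count_eq_zero, hkid]


lemma gD_snoc_not_mem (pd : PySem.Dict String (List (String × Int))) (seen : List String) (id : String)
    (h : id ∉ seen) :
    gD pd (seen ++ [id]) = (gD pd seen).insert id [pd.getD id []] := by
  apply PySem.Dict.ext
  have hc : (gD pd seen).contains id = false := by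
    rw [PySem.Dict.contains_eq_decide_mem_keys, gD_keys]
    simp [PySem.Set.mem_ofList, h]
  rw [PySem.Dict.items_insert_of_not_contains _ _ hc]
  simp only [gD, PySem.Set.ofList_append_singleton]
  have hadd : PySem.Set.add (PySem.Set.ofList seen) id = PySem.Set.ofList seen ++ [id] := by
    simp [PySem.Set.add, PySem.Set.contains, PySem.Set.mem_ofList, h]
  rw [hadd, List.map_append]
  congr 1
  · apply List.map_congr_left
    intro k hk
    have hk' : k ∈ seen := (PySem.Set.mem_ofList _ _).mp hk
    have hkid : k ≠ id := fun he => h (he ▸ hk')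
    simp [List.count_append, List.count_eq_zero, hkid]
  · simp [List.count_append, List.count_eq_zero.mpr h]


lemma loop_inv (pd : PySem.Dict String (List (String × Int))) (ids : List String) :
    ∀ seen, (∀ id ∈ ids, (pd.get? id).isSome = true) →
    filterProdIdInventoriesLoop pd ids (gD pd seen) = gD pd (seen ++ ids) := by
  induction ids with
  | nil => intro seen _; simp [filterProdIdInventoriesLoop]
  | cons id rest ih =>
    intro seen hall
    have hs : (pd.get? id).isSome = true := hall id (List.mem_cons_self ..)
    obtain ⟨pinv, heq⟩ := Option.isSome_iff_exists.mp hs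
    have hgetD : pd.getD id [] = pinv := by rw [PySem.Dict.getD_eq_get?_getD, heq]; rfl
    rw [filterProdIdInventoriesLoop, heq, gD_get?]
    by_cases h : id ∈ seen
    · simp only [h, if_true]
      rw [← hgetD, ← gD_snoc_mem pd seen id h,
        ih (seen ++ [id]) (fun x hx => hall x (List.mem_cons_of_mem _ hx)), List.append_assoc]
      rfl
    · simp only [h, if_false]
      rw [← hgetD, ← gD_snoc_not_mem pd seen id h,
        ih (seen ++ [id]) (fun x hx => hall x (List.mem_cons_of_mem _ hx)), List.append_assoc]
      rfl


lemma mem_fst_get?_isSome (l : List (String × List (String × Int))) (k : String)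
    (h : k ∈ l.map Prod.fst) : ((PySem.Dict.ofList l).get? k).isSome = true := by
  rw [← PySem.Dict.contains_eq_isSome_get?, PySem.Dict.contains_eq_decide_mem_keys]
  have : (PySem.Dict.ofList l).keys = PySem.Set.ofList (l.map Prod.fst) := by
    rw [show PySem.Dict.ofList l = l.foldl (fun d p => d.insert p.1 p.2) PySem.Dict.empty from rfl,
      PySem.Dict.keys_foldl_insert_key]
    simp [PySem.Dict.keys_empty, PySem.Set.update_nil_left]
  rw [this]
  simp only [PySem.Set.mem_ofList, decide_eq_true_eq]
  exact h


-- ===== VERDICT (by name: the statement is the Claim_ definition above) =====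
theorem filterProdIdInventories_spec : Claim_equal_filterProdIdInventories := by
  intro ids pidtoinv _ hpre
  unfold Spec_filterProdIdInventories filterProdIdInventories filterProdIdInventories_alt
  have hempty : (PySem.Dict.empty : PySem.Dict String (List (List (String × Int)))) = gD (PySem.Dict.ofList pidtoinv) [] := rfl
  rw [hempty, loop_inv _ ids [] (fun id hid => mem_fst_get?_isSome pidtoinv id (hpre id hid)),
    List.nil_append]
  show (gD (PySem.Dict.ofList pidtoinv) ids).items =
      ((ids.foldl (fun c id => c.insert id (c.getD id 0 + 1)) PySem.Dict.empty).items).map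
        (fun kc => (kc.1, PySem.List.pyRepeat [(PySem.Dict.ofList pidtoinv).getD kc.1 []] kc.2))
  rw [PySem.Dict.foldl_insert_getD_add_one_eq_counter, PySem.Dict.items_counter, List.map_map]
  simp only [gD]
  apply List.map_congr_left
  intro k _
  simp [Function.comp, PySem.List.pyRepeat_singleton]
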